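-- pv_equiv track=rewrite | github.com/Scofield666/HybridGNN | src/model.py | get_random_partition_list
-- ===== SOURCE A (Python) =====
-- def get_random_partition_list(random_layers):
--     random_partition_list = []
--     for ilayer in range(1, random_layers):
--         start = 1
--         for num in range(2 * ilayer + 1, 0, -2):
--             start *= num
--         random_partition_list.append(start)
--     return random_partition_list
-- ===== SOURCE B (Python) =====
-- def get_random_partition_list(random_layers):
--     # One pass with a running double-factorial product instead of an inner loop.
--     random_partition_list = []
--     acc = 1
--     for ilayer in range(1, random_layers):
--         acc *= 2 * ilayer + 1
--         random_partition_list.append(acc)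
--     return random_partition_list
-- ===== Notes on version B (the rewrite author's own statement) =====
-- stated objective: faster
-- what changed: Replaces the inner descending-odd-numbers product loop by a running product carried across iterations ((2i+1)!! = (2i+1)*(2i-1)!!), turning the quadratic nested loop into a single pass.
import Mathlib
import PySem

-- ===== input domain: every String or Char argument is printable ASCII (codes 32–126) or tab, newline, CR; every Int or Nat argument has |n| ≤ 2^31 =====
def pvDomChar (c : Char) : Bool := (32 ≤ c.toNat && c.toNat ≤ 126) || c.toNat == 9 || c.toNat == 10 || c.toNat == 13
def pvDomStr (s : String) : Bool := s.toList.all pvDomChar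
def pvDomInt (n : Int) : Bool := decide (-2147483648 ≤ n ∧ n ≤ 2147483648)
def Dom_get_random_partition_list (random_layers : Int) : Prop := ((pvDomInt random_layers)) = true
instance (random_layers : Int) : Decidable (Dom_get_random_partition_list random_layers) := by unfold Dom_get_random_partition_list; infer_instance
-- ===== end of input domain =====

-- B replaces the inner descending-odds product loop with a running product ((2i+1)!! = (2i+1)·(2i-1)!!): one pass instead of nested loops.

-- ===== PORT A =====
def get_random_partition_list (random_layers : Int) : List Int :=
  (PySem.List.pyRange 1 random_layers 1).foldl
    (fun random_partition_list ilayer =>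
      random_partition_list ++
        [(PySem.List.pyRange (2 * ilayer + 1) 0 (-2)).foldl (fun start num => start * num) 1])
    []

-- ===== PORT B =====
def get_random_partition_list_alt (random_layers : Int) : List Int :=
  ((PySem.List.pyRange 1 random_layers 1).foldl
    (fun (st : List Int × Int) ilayer =>
      let acc := st.2 * (2 * ilayer + 1)
      (st.1 ++ [acc], acc))
    ([], 1)).1

-- ===== PRECONDITION & SPEC =====
def Spec_get_random_partition_list (random_layers : Int) (out : List Int) : Prop := out = get_random_partition_list_alt random_layers
instance (random_layers : Int) (out : List Int) : Decidable (Spec_get_random_partition_list random_layers out) := by unfold Spec_get_random_partition_list; infer_instance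

-- ===== CLAIM (what is proved, stated in full; the proofs are below) =====
def Claim_equal_get_random_partition_list : Prop := ∀ (random_layers : Int), Dom_get_random_partition_list random_layers → Spec_get_random_partition_list random_layers (get_random_partition_list random_layers)

-- ===== LEMMAS AND PROOFS =====

-- (2n+1)!! for n : Nat
def pvOddFac : Nat → Int
  | 0 => 1
  | n + 1 => (2 * (n : Int) + 3) * pvOddFac n

lemma pvRange_neg2_cons (a : Int) (h : 0 < a) :
    PySem.List.pyRange a 0 (-2) = a :: PySem.List.pyRange (a - 2) 0 (-2) := by
  by_cases h3 : 0 < a - 2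
  · simp only [PySem.List.pyRange, if_neg (by norm_num : ¬((-2:Int) = 0)),
      if_neg (by norm_num : ¬(0:Int) < -2), if_pos h, if_pos h3]
    have hc : ((a - 0 + -(-2) - 1) / -(-2)).toNat = ((a - 2 - 0 + -(-2) - 1) / -(-2)).toNat + 1 := by
      norm_num
      omega
    rw [hc, List.range_succ_eq_map, List.map_cons, List.map_map]
    congr 1
    · norm_num
    · exact List.map_congr_left (fun k _ => by simp only [Function.comp_apply]; push_cast; ring)
  · simp only [PySem.List.pyRange, if_neg (by norm_num : ¬((-2:Int) = 0)),
      if_neg (by norm_num : ¬(0:Int) < -2), if_pos h, if_neg h3]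
    have hc : ((a - 0 + -(-2) - 1) / -(-2)).toNat = 1 := by norm_num; omega
    rw [hc]
    simp

lemma pvInner (n : Nat) (s : Int) :
    (PySem.List.pyRange (2 * (n : Int) + 1) 0 (-2)).foldl (fun start num => start * num) s
      = s * pvOddFac n := by
  induction n generalizing s with
  | zero =>
      rw [show PySem.List.pyRange (2 * ((0:Nat):Int) + 1) 0 (-2) = [1] from by decide]
      simp [pvOddFac]
  | succ m ih =>
      have h1 : (2 * ((m : Int) + 1) + 1) = (2 * (m : Int) + 1) + 2 := by ring
      rw [show ((m + 1 : Nat) : Int) = (m : Int) + 1 by push_cast; ring, h1,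
        pvRange_neg2_cons _ (by positivity)]
      simp only [List.foldl_cons, add_sub_cancel_right]
      rw [ih]
      simp [pvOddFac]; ring

lemma pvMain (n : Nat) :
    (PySem.List.pyRange 1 (1 + (n : Int)) 1).foldl
        (fun random_partition_list ilayer =>
          random_partition_list ++
            [(PySem.List.pyRange (2 * ilayer + 1) 0 (-2)).foldl (fun start num => start * num) 1])
        []
      = ((PySem.List.pyRange 1 (1 + (n : Int)) 1).foldl
          (fun (st : List Int × Int) ilayer =>
            let acc := st.2 * (2 * ilayer + 1)
            (st.1 ++ [acc], acc))
          ([], 1)).1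
    ∧ ((PySem.List.pyRange 1 (1 + (n : Int)) 1).foldl
          (fun (st : List Int × Int) ilayer =>
            let acc := st.2 * (2 * ilayer + 1)
            (st.1 ++ [acc], acc))
          ([], 1)).2 = pvOddFac n := by
  induction n with
  | zero => exact ⟨by decide, by decide⟩
  | succ m ih =>
      have hr : PySem.List.pyRange 1 (1 + ((m + 1 : Nat) : Int)) 1
          = PySem.List.pyRange 1 (1 + (m : Int)) 1 ++ [1 + (m : Int)] := by
        rw [show (1 + ((m + 1 : Nat) : Int)) = (1 + (m : Int)) + 1 by push_cast; ring,
          PySem.List.pyRange_one_succ_right (by omega)]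
      rw [hr, List.foldl_append, List.foldl_append, ih.1, List.foldl_cons, List.foldl_cons,
        List.foldl_nil, List.foldl_nil]
      have hinner : (PySem.List.pyRange (2 * (1 + (m : Int)) + 1) 0 (-2)).foldl
          (fun start num => start * num) 1 = pvOddFac (m + 1) := by
        rw [show (2 * (1 + (m : Int)) + 1) = 2 * ((m + 1 : Nat) : Int) + 1 by push_cast; ring,
          pvInner, one_mul]
      refine ⟨?_, ?_⟩
      · simp only [hinner, ih.2, pvOddFac]
        congr 2
        ring
      · simp only [ih.2, pvOddFac]
        ring

-- ===== VERDICT (by name: the statement is the Claim_ definition above) =====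
theorem get_random_partition_list_spec : Claim_equal_get_random_partition_list := by
  intro rl _
  unfold Spec_get_random_partition_list get_random_partition_list get_random_partition_list_alt
  by_cases h : rl ≤ 1
  · rw [PySem.List.pyRange_one_eq_nil h]; rfl
  · obtain ⟨n, hn⟩ : ∃ n : Nat, rl = 1 + (n : Int) :=
      ⟨(rl - 1).toNat, by omega⟩
    rw [hn]; exact (pvMain n).1
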